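-- pv_equiv track=rewrite | github.com/pypi-data/pypi-mirror-398 | packages/repocards/repocards-0.1.3-py3-none-any.whl/repocards/core/detectors.py | split_weight_and_dataset_links
-- ===== SOURCE A (Python) =====
-- from typing import Dict, List, Tuple, Any
--
-- def split_weight_and_dataset_links(urls: List[Tuple[str,str]]) -> Dict[str, List[str]]:
--     weights, datasets = [], []
--     for u, _ in urls:
--         ul = u.lower()
--         if any(ul.endswith(ext) for ext in (".pt",".pth",".onnx",".ckpt",".safetensors")) or "huggingface.co" in ul:
--             weights.append(u)
--         if any(d in ul for d in ("zenodo.org","figshare.com","kaggle.com","drive.google.com")):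
--             datasets.append(u)
--     # dedupe
--     def ded(seq):
--         out, seen = [], set()
--         for x in seq:
--             if x not in seen: out.append(x); seen.add(x)
--         return out
--     return {"model_weight_links": ded(weights)[:12], "dataset_links": ded(datasets)[:12]}
-- ===== SOURCE B (Python) =====
-- from typing import Dict, List, Tuple
--
--
-- def split_weight_and_dataset_links(urls: List[Tuple[str, str]]) -> Dict[str, List[str]]:
--     # Dedupe FIRST (classification is a pure function of the URL, so dedup and
--     # classification commute), then classify the unique URLs with two filters.
--     uniq = list(dict.fromkeys(u for u, _ in urls))
--     weights = [u for u in uniq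
--                if u.lower().endswith((".pt", ".pth", ".onnx", ".ckpt", ".safetensors"))
--                or "huggingface.co" in u.lower()]
--     datasets = [u for u in uniq
--                 if any(d in u.lower() for d in ("zenodo.org", "figshare.com", "kaggle.com", "drive.google.com"))]
--     return {"model_weight_links": weights[:12], "dataset_links": datasets[:12]}
-- ===== Notes on version B (the rewrite author's own statement) =====
-- stated objective: simpler
-- what changed: B reverses the order of the two stages: it dedupes the URL list once up front (dict.fromkeys) and then classifies the unique URLs with two plain filters, instead of A's classify-into-two-lists loop followed by a separate seen-set dedup pass per list; correctness rests on dedup commuting with value-determined filters.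
import Mathlib
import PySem

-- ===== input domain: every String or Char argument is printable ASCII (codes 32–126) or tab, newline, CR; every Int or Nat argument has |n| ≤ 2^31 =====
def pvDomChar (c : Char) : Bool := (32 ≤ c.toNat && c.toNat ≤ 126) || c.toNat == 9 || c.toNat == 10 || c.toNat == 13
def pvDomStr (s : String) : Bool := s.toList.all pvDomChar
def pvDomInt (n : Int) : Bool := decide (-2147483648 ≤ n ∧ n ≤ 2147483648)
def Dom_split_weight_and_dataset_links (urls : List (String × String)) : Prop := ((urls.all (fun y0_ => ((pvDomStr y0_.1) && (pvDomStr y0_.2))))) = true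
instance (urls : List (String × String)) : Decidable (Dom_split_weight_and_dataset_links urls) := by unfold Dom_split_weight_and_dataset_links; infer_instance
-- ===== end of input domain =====

-- B dedupes the URL list once up front and then classifies the unique URLs with two filters, instead of classify-then-dedup-each-list (objective: simpler; same results since the predicates depend only on the URL value).


-- ===== PORT A =====
-- ded(seq): out/seen accumulator loop, first occurrences kept
def pvDed (seq : List String) : List String :=
  (seq.foldl (fun (st : List String × PySem.Set String) x =>
      if PySem.Set.contains st.2 x then st else (st.1 ++ [x], PySem.Set.add st.2 x))
    ([], PySem.Set.empty)).1

def split_weight_and_dataset_links (urls : List (String × String)) : List (String × List String) :=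
  let wd := urls.foldl (fun (st : List String × List String) p =>
      let ul := PySem.Str.lower p.1
      let st1 := if ([".pt", ".pth", ".onnx", ".ckpt", ".safetensors"].any
                      (fun ext => PySem.Str.endswith ul ext)) || PySem.Str.isIn "huggingface.co" ul
                 then (st.1 ++ [p.1], st.2) else st
      if ["zenodo.org", "figshare.com", "kaggle.com", "drive.google.com"].any
          (fun d => PySem.Str.isIn d ul)
      then (st1.1, st1.2 ++ [p.1]) else st1)
    ([], [])
  -- seq[:12] on the deduped lists
  [("model_weight_links", PySem.List.slice (pvDed wd.1) none (some 12)),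
   ("dataset_links", PySem.List.slice (pvDed wd.2) none (some 12))]

-- ===== PORT B =====
-- uniq = list(dict.fromkeys(u for u, _ in urls)); then two filter comprehensions; [:12] at the end
def split_weight_and_dataset_links_alt (urls : List (String × String)) : List (String × List String) :=
  let uniq := PySem.List.dedup (urls.map Prod.fst)
  let weights := uniq.filter (fun u =>
      ([".pt", ".pth", ".onnx", ".ckpt", ".safetensors"].any
        (fun ext => PySem.Str.endswith (PySem.Str.lower u) ext)) || PySem.Str.isIn "huggingface.co" (PySem.Str.lower u))
  let datasets := uniq.filter (fun u =>
      ["zenodo.org", "figshare.com", "kaggle.com", "drive.google.com"].any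
        (fun d => PySem.Str.isIn d (PySem.Str.lower u)))
  [("model_weight_links", PySem.List.slice weights none (some 12)),
   ("dataset_links", PySem.List.slice datasets none (some 12))]

-- ===== PRECONDITION & SPEC =====
def Spec_split_weight_and_dataset_links (urls : List (String × String)) (out : List (String × List String)) : Prop := out = split_weight_and_dataset_links_alt urls
instance (urls : List (String × String)) (out : List (String × List String)) : Decidable (Spec_split_weight_and_dataset_links urls out) := by unfold Spec_split_weight_and_dataset_links; infer_instance

-- ===== CLAIM (what is proved, stated in full; the proofs are below) =====
def Claim_equal_split_weight_and_dataset_links : Prop := ∀ (urls : List (String × String)), Dom_split_weight_and_dataset_links urls → Spec_split_weight_and_dataset_links urls (split_weight_and_dataset_links urls)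

-- ===== LEMMAS AND PROOFS =====

-- the weight / dataset predicates, as A applies them to each URL
def pvPW (u : String) : Bool :=
  ([".pt", ".pth", ".onnx", ".ckpt", ".safetensors"].any
    (fun ext => PySem.Str.endswith (PySem.Str.lower u) ext)) || PySem.Str.isIn "huggingface.co" (PySem.Str.lower u)
def pvPD (u : String) : Bool :=
  ["zenodo.org", "figshare.com", "kaggle.com", "drive.google.com"].any
    (fun d => PySem.Str.isIn d (PySem.Str.lower u))

-- A's classification loop appends exactly the classified URLs, in order
theorem pvAfold_eq (urls : List (String × String)) (w d : List String) :
    urls.foldl (fun (st : List String × List String) p =>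
      let ul := PySem.Str.lower p.1
      let st1 := if ([".pt", ".pth", ".onnx", ".ckpt", ".safetensors"].any
                      (fun ext => PySem.Str.endswith ul ext)) || PySem.Str.isIn "huggingface.co" ul
                 then (st.1 ++ [p.1], st.2) else st
      if ["zenodo.org", "figshare.com", "kaggle.com", "drive.google.com"].any
          (fun dd => PySem.Str.isIn dd ul)
      then (st1.1, st1.2 ++ [p.1]) else st1) (w, d)
    = (w ++ (urls.map Prod.fst).filter pvPW, d ++ (urls.map Prod.fst).filter pvPD) := by
  induction urls generalizing w d with
  | nil => simp
  | cons p us ih =>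
    simp only [List.foldl_cons]
    split_ifs <;> rw [ih] <;> simp_all [pvPW, pvPD]

-- A's ded() is exactly set-of-list dedup: out and seen stay the same list throughout
theorem pvDedFold_eq (l : List String) (s : PySem.Set String) :
    l.foldl (fun (st : List String × PySem.Set String) x =>
        if PySem.Set.contains st.2 x then st else (st.1 ++ [x], PySem.Set.add st.2 x)) (s, s)
    = (PySem.Set.update s l, PySem.Set.update s l) := by
  induction l generalizing s with
  | nil => simp [PySem.Set.update_nil]
  | cons x xs ih =>
    simp only [List.foldl_cons, PySem.Set.update_cons]
    by_cases hx : x ∈ s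
    · rw [if_pos ((PySem.Set.contains_iff s x).mpr hx), PySem.Set.add_of_mem hx]
      exact ih s
    · have ha : PySem.Set.add s x = s ++ [x] := PySem.Set.add_of_not_mem hx
      rw [if_neg (fun hc => hx ((PySem.Set.contains_iff s x).mp hc)), ha]
      exact ih (s ++ [x])

theorem pvDed_eq_ofList (l : List String) : pvDed l = PySem.Set.ofList l := by
  unfold pvDed
  simp only [PySem.Set.empty]
  rw [pvDedFold_eq l ([] : PySem.Set String), PySem.Set.update_nil_left]

-- dedup commutes with a value-determined filter
theorem pvOfList_filter (p : String → Bool) (l : List String) :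
    PySem.Set.ofList (l.filter p) = (PySem.Set.ofList l).filter p := by
  induction l using List.reverseRecOn with
  | nil => simp
  | append_singleton xs x ih =>
    rw [List.filter_append, PySem.Set.ofList_append_singleton]
    by_cases hp : p x = true
    · simp only [List.filter_cons, hp, if_pos, List.filter_nil]
      rw [PySem.Set.ofList_append_singleton, ih]
      by_cases hx : x ∈ PySem.Set.ofList xs
      · have hxf : x ∈ (PySem.Set.ofList xs).filter p := List.mem_filter.mpr ⟨hx, hp⟩
        rw [PySem.Set.add_of_mem hxf, PySem.Set.add_of_mem hx]
      · have hxf : x ∉ (PySem.Set.ofList xs).filter p := fun h => hx (List.mem_filter.mp h).1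
        rw [PySem.Set.add_of_not_mem hxf, PySem.Set.add_of_not_mem hx, List.filter_append]
        simp [hp]
    · have hp' : p x = false := by simpa using hp
      simp only [List.filter_cons, hp', Bool.false_eq_true, if_false, List.filter_nil,
        List.append_nil, ih]
      by_cases hx : x ∈ PySem.Set.ofList xs
      · rw [PySem.Set.add_of_mem hx]
      · rw [PySem.Set.add_of_not_mem hx, List.filter_append]
        simp [hp']

-- ===== VERDICT (by name: the statement is the Claim_ definition above) =====
theorem split_weight_and_dataset_links_spec : Claim_equal_split_weight_and_dataset_links := by
  intro urls _
  show split_weight_and_dataset_links urls = split_weight_and_dataset_links_alt urls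
  simp only [split_weight_and_dataset_links, split_weight_and_dataset_links_alt]
  rw [pvAfold_eq]
  simp only [List.nil_append]
  rw [pvDed_eq_ofList, pvDed_eq_ofList, pvOfList_filter, pvOfList_filter, PySem.List.dedup_eq_ofList]
  rfl
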